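-- pv_equiv track=rewrite | github.com/varunisrani/thinkaiback | scheduling/agents/assistant_director_agent.py | _calculate_travel_days
-- ===== SOURCE A (Python) =====
-- from typing import Dict, Any, List
--
-- def _calculate_travel_days(work_days: List[int]) -> List[int]:
--     """Calculate travel days between work periods."""
--     if len(work_days) < 2:
--         return []
--
--     travel_days = []
--     work_days_sorted = sorted(work_days)
--
--     for i in range(1, len(work_days_sorted)):
--         gap = work_days_sorted[i] - work_days_sorted[i-1]
--         if gap > 1:
--             # Add travel days in gaps
--             travel_days.extend(range(work_days_sorted[i-1] + 1, work_days_sorted[i]))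
--
--     return travel_days
-- ===== SOURCE B (Python) =====
-- from typing import List
--
-- def _calculate_travel_days(work_days: List[int]) -> List[int]:
--     """Calculate travel days between work periods."""
--     if len(work_days) < 2:
--         return []
--     lo, hi = min(work_days), max(work_days)
--     ws = set(work_days)
--     return [d for d in range(lo, hi + 1) if d not in ws]
-- ===== Notes on version B (the rewrite author's own statement) =====
-- stated objective: idiomatic
-- what changed: Replaces the pairwise gap-enumeration loop over the sorted list with a single pass over the full range [min, max] filtered through a set of work days; no sorting and no per-pair gap logic.
import Mathlib
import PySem

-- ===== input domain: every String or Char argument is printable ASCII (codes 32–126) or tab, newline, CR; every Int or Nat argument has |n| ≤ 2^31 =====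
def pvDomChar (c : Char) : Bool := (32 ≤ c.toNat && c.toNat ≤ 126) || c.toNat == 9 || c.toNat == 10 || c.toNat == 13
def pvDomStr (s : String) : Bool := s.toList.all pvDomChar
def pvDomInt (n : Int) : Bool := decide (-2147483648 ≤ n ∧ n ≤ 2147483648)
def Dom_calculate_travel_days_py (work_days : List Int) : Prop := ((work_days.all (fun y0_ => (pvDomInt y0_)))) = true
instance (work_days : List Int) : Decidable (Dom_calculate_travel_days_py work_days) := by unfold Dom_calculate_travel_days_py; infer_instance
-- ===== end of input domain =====

-- B replaces A's pairwise gap-enumeration over the sorted list by filtering the full range [min, max] through a set of the work days (idiomatic; no speed claim).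

-- ===== PORT A =====
def calculate_travel_days_py (work_days : List Int) : List Int :=
  if work_days.length < 2 then []
  else
    let travel_days : List Int := []
    let work_days_sorted := PySem.List.sorted work_days (fun x => x) false
    (PySem.List.pyRange 1 (work_days_sorted.length : Int) 1).foldl
      (fun acc i =>
        let gap := PySem.List.pyGetD work_days_sorted i 0 - PySem.List.pyGetD work_days_sorted (i - 1) 0
        if gap > 1 then
          acc ++ PySem.List.pyRange (PySem.List.pyGetD work_days_sorted (i - 1) 0 + 1) (PySem.List.pyGetD work_days_sorted i 0) 1
        else acc)
      travel_days

-- ===== PORT B =====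
def calculate_travel_days_py_alt (work_days : List Int) : List Int :=
  if work_days.length < 2 then []
  else
    let lo := (PySem.List.min? work_days (fun x => x)).getD 0
    let hi := (PySem.List.max? work_days (fun x => x)).getD 0
    let ws := PySem.Set.ofList work_days
    (PySem.List.pyRange lo (hi + 1) 1).filter (fun d => !(PySem.Set.contains ws d))

-- ===== PRECONDITION & SPEC =====
def Spec_calculate_travel_days_py (work_days : List Int) (out : List Int) : Prop := out = calculate_travel_days_py_alt work_days
instance (work_days : List Int) (out : List Int) : Decidable (Spec_calculate_travel_days_py work_days out) := by unfold Spec_calculate_travel_days_py; infer_instance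

-- ===== CLAIM (what is proved, stated in full; the proofs are below) =====
def Claim_equal_calculate_travel_days_py : Prop := ∀ (work_days : List Int), Dom_calculate_travel_days_py work_days → Spec_calculate_travel_days_py work_days (calculate_travel_days_py work_days)

-- ===== LEMMAS AND PROOFS =====

-- Pairwise gap list of a (sorted) list: structural form of A's index loop.
def pvGaps : List Int → List Int
  | a :: b :: t => (if b - a > 1 then PySem.List.pyRange (a + 1) b 1 else []) ++ pvGaps (b :: t)
  | _ => []

-- A's loop body, parameterised by the sorted list.
def pvF (s : List Int) (acc : List Int) (i : Int) : List Int :=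
  let gap := PySem.List.pyGetD s i 0 - PySem.List.pyGetD s (i - 1) 0
  if gap > 1 then
    acc ++ PySem.List.pyRange (PySem.List.pyGetD s (i - 1) 0 + 1) (PySem.List.pyGetD s i 0) 1
  else acc

lemma pv_shift_range (n : Int) :
    PySem.List.pyRange 2 (n + 1) 1 = (PySem.List.pyRange 1 n 1).map (fun x => x + 1) := by
  rw [PySem.List.pyRange_one, PySem.List.pyRange_one, List.map_map]
  have h : (n + 1 - 2).toNat = (n - 1).toNat := by omega
  rw [h]
  apply List.map_congr_left
  intro k _
  simp [Function.comp]
  omega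

lemma pv_getD_cons_shift (t : List Int) (a : Int) (x : Int)
    (h1 : 1 ≤ x) (_h2 : x < (t.length : Int)) :
    PySem.List.pyGetD (a :: t) (x + 1) 0 = PySem.List.pyGetD t x 0 ∧
    PySem.List.pyGetD (a :: t) x 0 = PySem.List.pyGetD t (x - 1) 0 := by
  have hk1 : 1 ≤ x.toNat := by omega
  constructor
  · rw [PySem.List.pyGetD_of_nonneg _ _ (by omega : (0:Int) ≤ x + 1),
        PySem.List.pyGetD_of_nonneg _ _ (by omega : (0:Int) ≤ x)]
    have e1 : (x + 1).toNat = x.toNat + 1 := by omega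
    rw [e1]
    simp
  · rw [PySem.List.pyGetD_of_nonneg _ _ (by omega : (0:Int) ≤ x),
        PySem.List.pyGetD_of_nonneg _ _ (by omega : (0:Int) ≤ x - 1)]
    have e2 : x.toNat = (x - 1).toNat + 1 := by omega
    rw [e2]
    simp

lemma pv_fold_eq_gaps (s : List Int) (acc : List Int) :
    (PySem.List.pyRange 1 (s.length : Int) 1).foldl (pvF s) acc = acc ++ pvGaps s := by
  induction s generalizing acc with
  | nil =>
    rw [show ((([] : List Int)).length : Int) = 0 by simp,
        PySem.List.pyRange_one_eq_nil (by norm_num)]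
    simp [pvGaps]
  | cons a t ih =>
    cases t with
    | nil =>
      rw [show (([a] : List Int).length : Int) = 1 by simp,
          PySem.List.pyRange_one_eq_nil (by norm_num)]
      simp [pvGaps]
    | cons b u =>
      have hlen : (((a :: b :: u).length : Int)) = ((b :: u).length : Int) + 1 := by
        push_cast [List.length_cons]; ring
      have hn1 : (1 : Int) ≤ ((b :: u).length : Int) := by
        simp [List.length_cons]
      rw [hlen, PySem.List.pyRange_one_cons (by omega), List.foldl_cons]
      have hsh : PySem.List.pyRange (1 + 1) (((b :: u).length : Int) + 1) 1
          = (PySem.List.pyRange 1 ((b :: u).length : Int) 1).map (fun x => x + 1) := by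
        rw [show (1 : Int) + 1 = 2 by ring]; exact pv_shift_range _
      rw [hsh, List.foldl_map]
      have hcg : ∀ (acc' : List Int) (x : Int), x ∈ PySem.List.pyRange 1 ((b :: u).length : Int) 1 →
          pvF (a :: b :: u) acc' (x + 1) = pvF (b :: u) acc' x := by
        intro acc' x hx
        have hxr := (PySem.List.mem_pyRange_one).1 hx
        obtain ⟨hsh1, hsh2⟩ := pv_getD_cons_shift (b :: u) a x hxr.1 hxr.2
        simp only [pvF]
        rw [show x + 1 - 1 = x by ring, hsh1, hsh2]
      calc (PySem.List.pyRange 1 ((b :: u).length : Int) 1).foldl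
              (fun acc' x => pvF (a :: b :: u) acc' (x + 1)) (pvF (a :: b :: u) acc 1)
          = (PySem.List.pyRange 1 ((b :: u).length : Int) 1).foldl
              (pvF (b :: u)) (pvF (a :: b :: u) acc 1) :=
            PySem.List.foldl_congr_mem _ _ _ _ hcg
        _ = pvF (a :: b :: u) acc 1 ++ pvGaps (b :: u) := ih _
        _ = acc ++ pvGaps (a :: b :: u) := by
            have g1 : PySem.List.pyGetD (a :: b :: u) 1 0 = b := by
              rw [PySem.List.pyGetD_ofNat']
              simp
            have g0 : PySem.List.pyGetD (a :: b :: u) (1 - 1) 0 = a := by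
              rw [show (1 : Int) - 1 = (0 : Int) by ring, PySem.List.pyGetD_ofNat']
              simp
            have hF1 : pvF (a :: b :: u) acc 1 =
                acc ++ (if b - a > 1 then PySem.List.pyRange (a + 1) b 1 else []) := by
              simp only [pvF, g1, g0]
              split_ifs <;> simp
            have hg : pvGaps (a :: b :: u) =
                (if b - a > 1 then PySem.List.pyRange (a + 1) b 1 else []) ++ pvGaps (b :: u) := rfl
            rw [hF1, List.append_assoc, hg]

lemma pv_le_getLast (l : List Int) (h : l ≠ []) (hp : l.Pairwise (· ≤ ·)) :
    ∀ y ∈ l, y ≤ l.getLast h := by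
  induction l with
  | nil => exact absurd rfl h
  | cons a t ih =>
    cases t with
    | nil => intro y hy; simp at hy; simp [hy]
    | cons b u =>
      rw [List.pairwise_cons] at hp
      intro y hy
      rw [List.getLast_cons (by simp)]
      rcases List.mem_cons.1 hy with rfl | hy'
      · exact hp.1 _ (List.getLast_mem _)
      · exact ih (by simp) hp.2 y hy'

lemma pv_gaps_eq_filter (u : List Int) : ∀ (b : Int), (b :: u).Pairwise (· ≤ ·) →
    pvGaps (b :: u) =
      (PySem.List.pyRange b ((b :: u).getLast (List.cons_ne_nil _ _) + 1) 1).filter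
        (fun d => !(decide (d ∈ b :: u))) := by
  induction u with
  | nil =>
    intro b _
    rw [show (([b] : List Int).getLast (List.cons_ne_nil _ _)) = b by simp,
        PySem.List.pyRange_one_singleton]
    simp [pvGaps]
  | cons c v ih =>
    intro b h
    rw [List.pairwise_cons] at h
    obtain ⟨hball, h2⟩ := h
    have hbc : b ≤ c := hball c (by simp)
    have hcall : ∀ x ∈ v, c ≤ x := (List.pairwise_cons.1 h2).1
    have hcL : c ≤ (c :: v).getLast (List.cons_ne_nil _ _) :=
      pv_le_getLast _ _ h2 c (by simp)
    have hgL : (b :: c :: v).getLast (List.cons_ne_nil _ _) =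
        (c :: v).getLast (List.cons_ne_nil _ _) := List.getLast_cons (by simp)
    rw [hgL]
    rw [PySem.List.pyRange_one_append b c ((c :: v).getLast (List.cons_ne_nil _ _) + 1) hbc
        (by omega), List.filter_append]
    have hsecond :
        (PySem.List.pyRange c ((c :: v).getLast (List.cons_ne_nil _ _) + 1) 1).filter
            (fun d => !(decide (d ∈ b :: c :: v)))
        = (PySem.List.pyRange c ((c :: v).getLast (List.cons_ne_nil _ _) + 1) 1).filter
            (fun d => !(decide (d ∈ c :: v))) := by
      apply List.filter_congr
      intro d hd
      have hdr := (PySem.List.mem_pyRange_one).1 hd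
      by_cases hdb : d = b
      · subst hdb
        have hbceq : d = c := le_antisymm hbc hdr.1
        subst hbceq
        simp
      · simp [List.mem_cons, hdb]
    have hfirst :
        (PySem.List.pyRange b c 1).filter (fun d => !(decide (d ∈ b :: c :: v)))
        = (if c - b > 1 then PySem.List.pyRange (b + 1) c 1 else []) := by
      by_cases hlt : b < c
      · rw [PySem.List.pyRange_one_cons hlt, List.filter_cons]
        have hbmem : (!(decide (b ∈ b :: c :: v))) = false := by simp
        rw [hbmem]
        simp only [Bool.false_eq_true, if_false]
        have keep : (PySem.List.pyRange (b + 1) c 1).filter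
            (fun d => !(decide (d ∈ b :: c :: v))) = PySem.List.pyRange (b + 1) c 1 := by
          rw [List.filter_eq_self]
          intro d hd
          have hdr := (PySem.List.mem_pyRange_one).1 hd
          have hnv : d ∉ v := fun hin => by have := hcall d hin; omega
          simp only [List.mem_cons, Bool.not_eq_eq_eq_not, Bool.not_true,
            decide_eq_false_iff_not]
          rintro (rfl | rfl | hin)
          · omega
          · omega
          · exact hnv hin
        rw [keep]
        by_cases hg : c - b > 1
        · rw [if_pos hg]
        · rw [if_neg hg, PySem.List.pyRange_one_eq_nil (by omega)]
      · have hbc' : b = c := le_antisymm hbc (not_lt.1 hlt)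
        rw [PySem.List.pyRange_one_eq_nil (by omega), if_neg (by omega)]
        simp
    rw [hsecond, hfirst, ← ih c h2]
    simp [pvGaps]

-- ===== VERDICT (by name: the statement is the Claim_ definition above) =====
theorem calculate_travel_days_py_spec : Claim_equal_calculate_travel_days_py := by
  unfold Claim_equal_calculate_travel_days_py
  intro wd _
  unfold Spec_calculate_travel_days_py
  by_cases hlen : wd.length < 2
  · simp [calculate_travel_days_py, calculate_travel_days_py_alt, hlen]
  · have hw : wd ≠ [] := by intro h; subst h; simp at hlen
    obtain ⟨a, t, hst⟩ : ∃ a t, PySem.List.sorted wd (fun x => x) false = a :: t := by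
      cases hc : PySem.List.sorted wd (fun x => x) false with
      | nil => exact absurd ((PySem.List.sorted_eq_nil_iff _ _ _).1 hc) hw
      | cons a t => exact ⟨a, t, rfl⟩
    have hperm : (a :: t).Perm wd := hst ▸ PySem.List.sorted_perm wd (fun x => x) false
    have hpair : (a :: t).Pairwise (· ≤ ·) := by
      have := PySem.List.sorted_pairwise wd (fun x => x)
      rw [hst] at this
      simpa using this
    have hlens : (a :: t).length = wd.length := hperm.length_eq
    have htne : t ≠ [] := by
      intro h; rw [h] at hlens; simp at hlens; omega
    have hamem : a ∈ wd := hperm.mem_iff.1 (by simp)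
    have haall : ∀ y ∈ wd, a ≤ y := by
      intro y hy
      rcases List.mem_cons.1 (hperm.mem_iff.2 hy) with rfl | hmem
      · exact le_refl _
      · exact (List.pairwise_cons.1 hpair).1 y hmem
    obtain ⟨m, hm⟩ : ∃ m, PySem.List.min? wd (fun x => x) = some m := by
      cases hc : PySem.List.min? wd (fun x => x) with
      | none => exact absurd ((PySem.List.min?_eq_none_iff _ _).1 hc) hw
      | some m => exact ⟨m, rfl⟩
    have hma : m = a :=
      le_antisymm (PySem.List.min?_isMin hm a hamem) (haall m (PySem.List.min?_mem hm))
    have hLmem : (a :: t).getLast (List.cons_ne_nil _ _) ∈ wd :=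
      hperm.mem_iff.1 (List.getLast_mem _)
    have hLall : ∀ y ∈ wd, y ≤ (a :: t).getLast (List.cons_ne_nil _ _) := fun y hy =>
      pv_le_getLast (a :: t) (List.cons_ne_nil _ _) hpair y (hperm.mem_iff.2 hy)
    obtain ⟨M, hM⟩ : ∃ M, PySem.List.max? wd (fun x => x) = some M := by
      cases hc : PySem.List.max? wd (fun x => x) with
      | none => exact absurd ((PySem.List.max?_eq_none_iff _ _).1 hc) hw
      | some M => exact ⟨M, rfl⟩
    have hML : M = (a :: t).getLast (List.cons_ne_nil _ _) :=
      le_antisymm (hLall M (PySem.List.max?_mem hM)) (PySem.List.max?_isMax hM _ hLmem)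
    have hA : calculate_travel_days_py wd = pvGaps (a :: t) := by
      rw [calculate_travel_days_py, if_neg hlen]
      show (PySem.List.pyRange 1 ((PySem.List.sorted wd (fun x => x) false).length : Int) 1).foldl
        (pvF (PySem.List.sorted wd (fun x => x) false)) [] = pvGaps (a :: t)
      rw [hst, pv_fold_eq_gaps]
      simp
    have hB : calculate_travel_days_py_alt wd
        = (PySem.List.pyRange a ((a :: t).getLast (List.cons_ne_nil _ _) + 1) 1).filter
            (fun d => !(decide (d ∈ a :: t))) := by
      rw [calculate_travel_days_py_alt, if_neg hlen]
      show (PySem.List.pyRange ((PySem.List.min? wd (fun x => x)).getD 0)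
              ((PySem.List.max? wd (fun x => x)).getD 0 + 1) 1).filter
            (fun d => !(PySem.Set.contains (PySem.Set.ofList wd) d)) = _
      rw [hm, hM]
      simp only [Option.getD_some, hma, hML]
      apply List.filter_congr
      intro d _
      have hmemiff : (d ∈ PySem.Set.ofList wd) ↔ d ∈ (a :: t) := by
        rw [PySem.Set.mem_ofList, hperm.mem_iff]
      simp [PySem.Set.contains, hmemiff]
    rw [hA, hB]
    exact pv_gaps_eq_filter t a hpair
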